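-- pv_equiv track=rewrite | github.com/SeongHyeon-Yun/Progarmmers | 프로그래머스/unrated/181880. 1로 만들기/1로 만들기.py | solution
-- ===== SOURCE A (Python) =====
-- def solution(num_list):
--     answer = 0
--     count = 0
--     while True:
--         for i in range(len(num_list)):
--             if num_list[i] % 2 == 0 and num_list[i] > 1:
--                 num_list[i] = num_list[i] // 2
--                 answer += 1
--             elif num_list[i] % 2 == 1 and num_list[i] > 1:
--                 num_list[i] -= 1
--                 num_list[i] = num_list[i] // 2
--                 answer += 1
--         if len(set(num_list)) == 1:
--             break
--     return answer
-- ===== SOURCE B (Python) =====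
-- def solution(num_list):
--     # Closed form: A's loop halves every element > 1 once per pass and stops
--     # after the first pass that leaves all elements equal.  Passes needed:
--     # smallest p >= 1 with max(1, mn >> p) == max(1, mx >> p) (monotonicity:
--     # endpoints equal => all equal).  Each element > 1 is halved once per pass
--     # until it reaches 1, i.e. min(p, bit_length-1) times.
--     mn, mx = min(num_list), max(num_list)
--     p = 1
--     while max(1, mn >> p) != max(1, mx >> p):
--         p += 1
--     return sum(min(p, n.bit_length() - 1) for n in num_list if n > 1)
-- ===== Notes on version B (the rewrite author's own statement) =====
-- stated objective: alternative
-- what changed: Replaces the repeated in-place halving passes with a closed form: the pass count p is found by shifting only min and max until they clamp-equal, and the answer is a single sum of min(p, bit_length(n)-1) over elements > 1 (intended as faster, O(n+log M) vs O(n log M); a timing run could not confirm a ratio because A diverges on the random timing family).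
-- outside the precondition, e.g. on solution([]): A does not finish within the time limit, B raises ValueError
import Mathlib
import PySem

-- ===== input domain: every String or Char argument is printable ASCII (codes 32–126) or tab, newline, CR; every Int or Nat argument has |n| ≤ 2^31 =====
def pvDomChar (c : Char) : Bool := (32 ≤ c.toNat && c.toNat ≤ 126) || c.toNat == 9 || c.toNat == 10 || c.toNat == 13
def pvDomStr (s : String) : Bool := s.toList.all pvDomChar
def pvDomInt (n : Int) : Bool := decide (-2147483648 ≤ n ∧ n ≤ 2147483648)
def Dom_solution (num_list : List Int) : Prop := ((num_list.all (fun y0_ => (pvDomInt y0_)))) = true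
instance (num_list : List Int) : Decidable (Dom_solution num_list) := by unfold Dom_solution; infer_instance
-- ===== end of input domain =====

-- B replaces A's repeated halving passes by a closed form (pass count from min/max,
-- then one sum of min(p, bit_length-1)); equivalence is about the RETURN value only:
-- the Python A mutates num_list in place, B does not.

-- ===== PORT A =====
-- one pass of A's inner `for i in range(len(num_list))` loop: rebuilds the list in
-- order and counts the `answer += 1` increments (in-place index update → new list)
def solutionPass (lst : List Int) : List Int × Int :=
  lst.foldl (fun acc n =>
    if PySem.Int.mod n 2 = 0 ∧ 1 < n then (acc.1 ++ [PySem.Int.floordiv n 2], acc.2 + 1)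
    else if PySem.Int.mod n 2 = 1 ∧ 1 < n then (acc.1 ++ [PySem.Int.floordiv (n - 1) 2], acc.2 + 1)
    else (acc.1 ++ [n], acc.2)) ([], 0)

-- A's `while True` loop; fuel only makes the recursion total (64 passes are enough
-- for every input admitted by Dom_solution ∧ Pre_solution, which the proof shows)
def solutionLoop : Nat → Int → List Int → Int
  | 0, ans, _ => ans
  | f+1, ans, lst =>
    let p := solutionPass lst
    let ans' := ans + p.2
    if (PySem.Set.ofList p.1).length = 1 then ans' else solutionLoop f ans' p.1

def solution (num_list : List Int) : Int := solutionLoop 64 0 num_list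

-- ===== PORT B =====
-- Source B's `while max(1, mn >> p) != max(1, mx >> p): p += 1`; p starts at 1 and only
-- grows, so Nat is exact; fuel 64 only makes it total (enough under Dom ∧ Pre)
def solutionAltLoop : Nat → Int → Int → Nat → Nat
  | 0, _, _, p => p
  | f+1, mn, mx, p => if max 1 (mn >>> p) ≠ max 1 (mx >>> p) then solutionAltLoop f mn mx (p+1) else p

def solution_alt (num_list : List Int) : Int :=
  let mn := (PySem.List.min? num_list (fun x => x)).getD 0   -- min() raises on []; outside Pre_
  let mx := (PySem.List.max? num_list (fun x => x)).getD 0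
  let p := solutionAltLoop 64 mn mx 1
  ((num_list.filter (fun n => decide (1 < n))).map
    (fun n => min (p : Int) ((PySem.Int.bitLength n : Int) - 1))).sum

-- ===== PRECONDITION & SPEC =====
-- Pre_ excludes exactly the inputs on which A never returns: the empty list
-- (len(set([])) is 0, never 1) and lists whose elements do not all converge to the
-- same value (an element ≤ 0 never changes, so mixed lists with a non-positive
-- element loop forever).  A returns on every input satisfying Pre_.
def Pre_solution (num_list : List Int) : Prop :=
  num_list ≠ [] ∧ ((∀ n ∈ num_list, 1 ≤ n) ∨ (∀ n ∈ num_list, n = num_list.headI))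
instance (num_list : List Int) : Decidable (Pre_solution num_list) := by
  unfold Pre_solution; infer_instance

def pvWitness_solution : List Int := [2, 8]

def Spec_solution (num_list : List Int) (out : Int) : Prop := out = solution_alt num_list
instance (num_list : List Int) (out : Int) : Decidable (Spec_solution num_list out) := by
  unfold Spec_solution; infer_instance

-- ===== CLAIM (what is proved, stated in full; the proofs are below) =====
def Claim_equal_solution : Prop := ∀ (num_list : List Int), Dom_solution num_list → Pre_solution num_list → Spec_solution num_list (solution num_list)

-- ===== LEMMAS AND PROOFS =====
-- the effect of one pass on one element: floor-halve if > 1, keep otherwise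
def hstep (n : Int) : Int := if 1 < n then n / 2 else n

-- t passes applied to one element
def hiter : Nat → Int → Int
  | 0, n => n
  | t+1, n => hstep (hiter t n)

-- per-element contribution of p passes (1 each pass while the value is still > 1)
def cntIter : Nat → Int → Int
  | 0, _ => 0
  | p+1, n => (if 1 < n then 1 else 0) + cntIter p (hstep n)

-- number of passes A executes (same guard as solutionLoop), and A's total restated
def pFind : Nat → List Int → Nat
  | 0, _ => 0
  | f+1, lst => if (PySem.Set.ofList (lst.map hstep)).length = 1 then 1
                else 1 + pFind f (lst.map hstep)

def refLoop : Nat → List Int → Int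
  | 0, _ => 0
  | f+1, lst => ((lst.filter (fun n => decide (1 < n))).length : Int) +
      (if (PySem.Set.ofList (lst.map hstep)).length = 1 then 0 else refLoop f (lst.map hstep))

-- basic facts about hstep / hiter
theorem hstep_mono {a b : Int} (h : a ≤ b) : hstep a ≤ hstep b := by
  unfold hstep; split_ifs <;> omega

theorem hiter_mono {a b : Int} (t : Nat) (h : a ≤ b) : hiter t a ≤ hiter t b := by
  induction t with
  | zero => exact h
  | succ t ih => exact hstep_mono ih

theorem hiter_clamp {n : Int} (t : Nat) (h : 1 ≤ n) :
    hiter t n = max 1 (n / 2 ^ t) := by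
  induction t with
  | zero => show n = _; simp; omega
  | succ t ih =>
      have h2t : (0:Int) < 2 ^ t := by positivity
      have hdivdiv : n / 2 ^ t / 2 = n / 2 ^ (t+1) := by
        rw [Int.ediv_ediv_of_nonneg (le_of_lt h2t)]
        ring_nf
      have hq : 0 ≤ n / 2 ^ t := Int.ediv_nonneg (by omega) (by omega)
      show hstep (hiter t n) = _
      rw [ih]
      unfold hstep
      by_cases hc : 1 < n / 2 ^ t
      · have : max 1 (n / 2 ^ t) = n / 2 ^ t := by omega
        rw [this]
        simp only [hc, if_pos]
        rw [hdivdiv]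
        have : 1 ≤ n / 2 ^ (t+1) := by
          rw [← hdivdiv]
          omega
        omega
      · have hmax : max 1 (n / 2 ^ t) = 1 := by omega
        rw [hmax]
        have : n / 2 ^ (t+1) ≤ 1 := by rw [← hdivdiv]; omega
        have : 0 ≤ n / 2 ^ (t+1) := Int.ediv_nonneg (by omega) (by positivity)
        simp only [if_neg (by omega : ¬ (1:Int) < 1)]
        omega




-- A's two live branches both floor-halve: one fold step of solutionPass
theorem pass_step (n : Int) (acc : List Int) (c : Int) :
    (if PySem.Int.mod n 2 = 0 ∧ 1 < n then (acc ++ [PySem.Int.floordiv n 2], c + 1)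
     else if PySem.Int.mod n 2 = 1 ∧ 1 < n then (acc ++ [PySem.Int.floordiv (n - 1) 2], c + 1)
     else (acc ++ [n], c)) = (acc ++ [hstep n], c + (if 1 < n then 1 else 0)) := by
  by_cases hn : 1 < n
  · have hm : PySem.Int.mod n 2 = n % 2 := PySem.Int.mod_eq_emod_of_pos (by omega)
    have hd : PySem.Int.floordiv n 2 = n / 2 := PySem.Int.floordiv_eq_ediv_of_pos (by omega)
    have hd' : PySem.Int.floordiv (n - 1) 2 = (n - 1) / 2 := PySem.Int.floordiv_eq_ediv_of_pos (by omega)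
    by_cases he : n % 2 = 0
    · simp only [hm, hd, he, hn, and_true, if_pos, hstep]
    · have ho : n % 2 = 1 := by omega
      have hdd : (n - 1) / 2 = n / 2 := by omega
      simp only [hm, hd', ho, hn, and_true, hstep, hdd]
      simp [he]
  · simp only [hstep, if_neg hn]
    simp [hn]

theorem pass_fold (lst : List Int) : ∀ (acc : List Int) (c : Int),
    lst.foldl (fun acc n =>
      if PySem.Int.mod n 2 = 0 ∧ 1 < n then (acc.1 ++ [PySem.Int.floordiv n 2], acc.2 + 1)
      else if PySem.Int.mod n 2 = 1 ∧ 1 < n then (acc.1 ++ [PySem.Int.floordiv (n - 1) 2], acc.2 + 1)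
      else (acc.1 ++ [n], acc.2)) (acc, c)
    = (acc ++ lst.map hstep, c + ((lst.filter (fun n => decide (1 < n))).length : Int)) := by
  induction lst with
  | nil => intro acc c; simp
  | cons n t ih =>
      intro acc c
      simp only [List.foldl_cons, pass_step n acc c, ih, List.map_cons, List.filter_cons]
      by_cases hn : 1 < n
      · simp [hn]; omega
      · simp [hn]

theorem pass_eq (lst : List Int) :
    solutionPass lst = (lst.map hstep, ((lst.filter (fun n => decide (1 < n))).length : Int)) := by
  unfold solutionPass
  rw [pass_fold]
  simp

-- len(set(l)) == 1 means: all elements equal the first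
theorem set_len_ge (l : List Int) : ∀ s : List Int,
    s.length ≤ (List.foldl PySem.Set.add s l).length := by
  induction l with
  | nil => intro s; simp
  | cons x t ih =>
      intro s
      refine le_trans ?_ (ih (PySem.Set.add s x))
      simp only [PySem.Set.add]
      split_ifs <;> simp

theorem set_len_one_iff (x : Int) (l : List Int) :
    (PySem.Set.ofList (x :: l)).length = 1 ↔ ∀ y ∈ l, y = x := by
  have hseed : PySem.Set.ofList (x :: l) = List.foldl PySem.Set.add [x] l := by
    simp [PySem.Set.ofList_eq_foldl, PySem.Set.add, PySem.Set.contains]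
  rw [hseed]
  clear hseed
  induction l with
  | nil => simp
  | cons y t ih =>
      by_cases hy : y = x
      · subst hy
        have hid : PySem.Set.add [y] y = [y] := by simp [PySem.Set.add, PySem.Set.contains]
        simp only [List.foldl_cons, hid, ih, List.forall_mem_cons, true_and]
      · have hadd : PySem.Set.add [x] y = [x, y] := by
          simp only [PySem.Set.add, PySem.Set.contains]
          simp [hy]
        have hge := set_len_ge t [x, y]
        simp only [List.foldl_cons, hadd]
        constructor
        · intro h; exfalso; simp at hge; omega
        · intro h; exfalso; exact hy (h y (by simp))


-- sums
theorem sum_map_zero (l : List Int) : (l.map (fun _ => (0:Int))).sum = 0 := by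
  induction l with
  | nil => rfl
  | cons n t ih => simp [ih]

theorem sum_map_add (l : List Int) (f g : Int → Int) :
    (l.map (fun n => f n + g n)).sum = (l.map f).sum + (l.map g).sum := by
  induction l with
  | nil => rfl
  | cons n t ih => simp [ih]; ring

theorem cnt_as_sum (l : List Int) :
    ((l.filter (fun n => decide (1 < n))).length : Int)
      = (l.map (fun n => if 1 < n then (1:Int) else 0)).sum := by
  induction l with
  | nil => rfl
  | cons n t ih =>
      simp only [List.filter_cons, List.map_cons, List.sum_cons]
      by_cases hn : 1 < n
      · simp [hn, ← ih]; ring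
      · simp [hn, ← ih]

-- A's loop equals its pass-count restatement
theorem loop_as_ref (fuel : Nat) : ∀ (ans : Int) (lst : List Int),
    solutionLoop fuel ans lst = ans + refLoop fuel lst := by
  induction fuel with
  | zero => intro ans lst; simp [solutionLoop, refLoop]
  | succ f ih =>
      intro ans lst
      simp only [solutionLoop, refLoop, pass_eq]
      split_ifs with hg
      · ring
      · rw [ih]; ring

theorem ref_as_cnt (fuel : Nat) : ∀ lst : List Int,
    refLoop fuel lst = (lst.map (cntIter (pFind fuel lst))).sum := by
  induction fuel with
  | zero => intro lst; simp [refLoop, pFind, cntIter, sum_map_zero]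
  | succ f ih =>
      intro lst
      simp only [refLoop, pFind]
      split_ifs with hg
      · simp only [cntIter]
        rw [cnt_as_sum, sum_map_add]
        simp [sum_map_zero, cntIter]
      · rw [ih (lst.map hstep), List.map_map]
        have : 1 + pFind f (lst.map hstep) = pFind f (lst.map hstep) + 1 := by omega
        rw [this]
        have hc : lst.map (cntIter (pFind f (lst.map hstep) + 1))
            = lst.map (fun n => (if 1 < n then (1:Int) else 0) + cntIter (pFind f (lst.map hstep)) (hstep n)) := rfl
        rw [hc, sum_map_add, cnt_as_sum]
        rfl

-- per-element count in closed form
theorem cntIter_fix (p : Nat) : cntIter p 1 = 0 := by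
  induction p with
  | zero => rfl
  | succ p ih => simp [cntIter, hstep, ih]

theorem bitLength_pos {n : Int} (h : 1 ≤ n) : 1 ≤ PySem.Int.bitLength n := by
  rw [PySem.Int.bitLength_of_pos (by omega)]
  omega

theorem cntIter_closed (p : Nat) : ∀ n : Int, 1 < n →
    cntIter p n = min (p : Int) ((PySem.Int.bitLength n : Int) - 1) := by
  induction p with
  | zero =>
      intro n hn
      have := bitLength_pos (le_of_lt hn)
      simp [cntIter]
      omega
  | succ p ih =>
      intro n hn
      have hbit : PySem.Int.bitLength n = PySem.Int.bitLength (PySem.Int.floordiv n 2) + 1 :=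
        PySem.Int.bitLength_of_pos (by omega)
      have hfd : PySem.Int.floordiv n 2 = n / 2 := PySem.Int.floordiv_eq_ediv_of_pos (by omega)
      have hhalf : 1 ≤ n / 2 := by omega
      simp only [cntIter, if_pos hn, hstep, if_pos hn]
      by_cases h2 : 1 < n / 2
      · rw [ih _ h2, hbit, hfd]
        have := bitLength_pos hhalf
        push_cast
        omega
      · have hone : n / 2 = 1 := by omega
        rw [hone, cntIter_fix]
        have : PySem.Int.bitLength n = 2 := by
          rw [hbit, hfd, hone]; decide
        rw [this]
        push_cast
        omega


-- bridge between Source B's clamped shift and the iterated pass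
theorem shift_clamp {n : Int} (p : Nat) (h : 1 ≤ n) :
    max 1 (n >>> p) = hiter p n := by
  rw [Int.shiftRight_eq_div_pow, hiter_clamp p h]
  push_cast
  rfl

theorem map_hiter_succ (lst : List Int) (t : Nat) :
    (lst.map (hiter t)).map hstep = lst.map (hiter (t+1)) := by
  rw [List.map_map]
  exact List.map_congr_left (fun n _ => rfl)

-- the set-size-1 guard on the t-times-halved list, read off min and max
theorem guard_iff (a : Int) (rest : List Int) (mn0 mx0 : Int)
    (hmn : mn0 ∈ a :: rest) (hmx : mx0 ∈ a :: rest)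
    (hlb : ∀ n ∈ a :: rest, mn0 ≤ n) (hub : ∀ n ∈ a :: rest, n ≤ mx0) (p : Nat) :
    (PySem.Set.ofList ((a :: rest).map (hiter p))).length = 1 ↔ hiter p mn0 = hiter p mx0 := by
  simp only [List.map_cons]
  rw [set_len_one_iff]
  constructor
  · intro h
    have himg : ∀ n ∈ a :: rest, hiter p n = hiter p a := by
      intro n hn
      rcases List.mem_cons.1 hn with rfl | hn'
      · rfl
      · exact h _ (List.mem_map_of_mem hn')
    rw [himg mn0 hmn, himg mx0 hmx]
  · intro h y hy
    rcases List.mem_map.1 hy with ⟨n, hn, rfl⟩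
    have h1 := hiter_mono p (hlb n (List.mem_cons_of_mem _ hn))
    have h2 := hiter_mono p (hub n (List.mem_cons_of_mem _ hn))
    have h3 := hiter_mono p (hlb a (List.mem_cons_self))
    have h4 := hiter_mono p (hub a (List.mem_cons_self))
    omega

-- B's p-search returns exactly the number of passes A executes
theorem loopB_eq (a : Int) (rest : List Int) (mn0 mx0 : Int)
    (hall : ∀ n ∈ a :: rest, 1 ≤ n) (hmn : mn0 ∈ a :: rest) (hmx : mx0 ∈ a :: rest)
    (hlb : ∀ n ∈ a :: rest, mn0 ≤ n) (hub : ∀ n ∈ a :: rest, n ≤ mx0) :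
    ∀ (f t : Nat), hiter (t+1+f) mn0 = hiter (t+1+f) mx0 →
    solutionAltLoop (f+1) mn0 mx0 (t+1) = t + pFind (f+1) ((a :: rest).map (hiter t)) := by
  have hmn1 : 1 ≤ mn0 := hall _ hmn
  have hmx1 : 1 ≤ mx0 := hall _ hmx
  intro f
  induction f with
  | zero =>
      intro t h
      simp only [Nat.add_zero] at h
      simp only [solutionAltLoop, pFind, map_hiter_succ]
      rw [if_neg (by rw [shift_clamp _ hmn1, shift_clamp _ hmx1]; simpa using h),
          if_pos ((guard_iff a rest mn0 mx0 hmn hmx hlb hub (t+1)).2 h)]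
  | succ f ih =>
      intro t h
      by_cases hc : hiter (t+1) mn0 = hiter (t+1) mx0
      · simp only [solutionAltLoop, pFind, map_hiter_succ]
        rw [if_neg (by rw [shift_clamp _ hmn1, shift_clamp _ hmx1]; simpa using hc),
            if_pos ((guard_iff a rest mn0 mx0 hmn hmx hlb hub (t+1)).2 hc)]
      · have hstep1 : solutionAltLoop (f+1+1) mn0 mx0 (t+1) = solutionAltLoop (f+1) mn0 mx0 (t+1+1) := by
          simp only [solutionAltLoop]
          rw [if_pos (by rw [shift_clamp _ hmn1, shift_clamp _ hmx1]; simpa using hc)]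
        have h' : hiter (t+1+1+f) mn0 = hiter (t+1+1+f) mx0 := by
          have : t+1+1+f = t+1+(f+1) := by omega
          rw [this]; exact h
        rw [hstep1, ih (t+1) h']
        have hpf : pFind (f+1+1) ((a :: rest).map (hiter t))
            = 1 + pFind (f+1) ((a :: rest).map (hiter (t+1))) := by
          conv_lhs => rw [pFind]
          rw [if_neg (by
            rw [map_hiter_succ]
            exact fun hg => hc ((guard_iff a rest mn0 mx0 hmn hmx hlb hub (t+1)).1 hg)),
            map_hiter_succ]
        rw [hpf]
        omega


-- drop the n = 1 terms and use the closed form of cntIter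
theorem sum_cnt_filter (p : Nat) : ∀ (lst : List Int), (∀ n ∈ lst, 1 ≤ n) →
    (lst.map (cntIter p)).sum
      = ((lst.filter (fun n => decide (1 < n))).map
          (fun n => min (p : Int) ((PySem.Int.bitLength n : Int) - 1))).sum := by
  intro lst
  induction lst with
  | nil => intro _; rfl
  | cons n t ih =>
      intro hall
      have hn1 : 1 ≤ n := hall n (by simp)
      have ht : ∀ m ∈ t, 1 ≤ m := fun m hm => hall m (by simp [hm])
      simp only [List.map_cons, List.sum_cons, List.filter_cons]
      by_cases hn : 1 < n
      · simp only [hn, decide_true, if_pos, List.map_cons, List.sum_cons]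
        rw [cntIter_closed p n hn, ih ht]
      · have h1 : n = 1 := by omega
        subst h1
        simp [cntIter_fix, ih ht]

-- 64 passes flatten every element the domain admits
theorem hiter64 {n : Int} (h1 : 1 ≤ n) (h2 : n ≤ 2147483648) : hiter 64 n = 1 := by
  rw [hiter_clamp 64 h1]
  have : n / 2 ^ 64 = 0 := Int.ediv_eq_zero_of_lt (by omega) (by norm_num; omega)
  rw [this]
  rfl

theorem solution_spec : Claim_equal_solution := by
  unfold Claim_equal_solution
  intro lst hdom hpre
  unfold Spec_solution
  obtain ⟨hne, hcase⟩ := hpre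
  obtain ⟨a, rest, rfl⟩ := List.exists_cons_of_ne_nil hne
  have hmin : PySem.List.min? (a :: rest) (fun x => x) = some (rest.foldl min a) :=
    PySem.List.min?_id_cons a rest
  have hmax : PySem.List.max? (a :: rest) (fun x => x) = some (rest.foldl max a) :=
    PySem.List.max?_id_cons a rest
  set mn0 := rest.foldl min a with hmn0
  set mx0 := rest.foldl max a with hmx0
  have hmnmem : mn0 ∈ a :: rest := PySem.List.min?_mem hmin
  have hmxmem : mx0 ∈ a :: rest := PySem.List.max?_mem hmax
  have hlb : ∀ n ∈ a :: rest, mn0 ≤ n := PySem.List.min?_isMin hmin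
  have hub : ∀ n ∈ a :: rest, n ≤ mx0 := PySem.List.max?_isMax hmax
  have hbound : ∀ n ∈ a :: rest, n ≤ 2147483648 := by
    intro n hn
    have := List.all_eq_true.1 hdom n hn
    simp only [pvDomInt, decide_eq_true_eq] at this
    omega
  simp only [solution_alt, hmin, hmax, Option.getD_some]
  by_cases hall : ∀ n ∈ a :: rest, 1 ≤ n
  · -- every element is ≥ 1: both sides count the halvings
    have h64 : hiter (0+1+63) mn0 = hiter (0+1+63) mx0 := by
      show hiter 64 mn0 = hiter 64 mx0
      rw [hiter64 (hall _ hmnmem) (hbound _ hmnmem),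
          hiter64 (hall _ hmxmem) (hbound _ hmxmem)]
    have hb := loopB_eq a rest mn0 mx0 hall hmnmem hmxmem hlb hub 63 0 h64
    have hmap0 : (a :: rest).map (hiter 0) = a :: rest := by
      rw [show hiter 0 = id from rfl, List.map_id]
    rw [hmap0] at hb
    show solution (a :: rest) = _
    unfold solution
    rw [loop_as_ref, ref_as_cnt, zero_add, sum_cnt_filter _ _ hall]
    norm_num at hb
    rw [hb]
  · -- some element < 1: Pre_ forces all elements equal; one no-op pass, answer 0
    have hequ : ∀ n ∈ a :: rest, n = a := by
      rcases hcase with h | h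
      · exact absurd h hall
      · simpa using h
    push_neg at hall
    obtain ⟨w, hwmem, hw⟩ := hall
    have ha1 : a < 1 := by rw [← hequ w hwmem]; omega
    have hfix : ∀ n ∈ a :: rest, hstep n = n := by
      intro n hn
      rw [hequ n hn]
      simp only [hstep, if_neg (by omega : ¬ (1:Int) < a)]
    have hmapfix : (a :: rest).map hstep = a :: rest := by
      exact List.map_congr_left hfix |>.trans (List.map_id _)
    have hfilter : (a :: rest).filter (fun n => decide (1 < n)) = [] := by
      rw [List.filter_eq_nil_iff]
      intro n hn
      rw [hequ n hn]
      simp only [decide_eq_true_eq]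
      omega
    have hguard : (PySem.Set.ofList (a :: rest)).length = 1 :=
      (set_len_one_iff a rest).2 (fun y hy => hequ y (by simp [hy]))
    have hmna : mn0 = a := hequ mn0 hmnmem
    have hmxa : mx0 = a := hequ mx0 hmxmem
    show solution (a :: rest) = _
    unfold solution solutionLoop
    rw [pass_eq]
    simp only [hmapfix, hfilter, hguard, if_pos]
    simp
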